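-- pv_equiv track=rewrite | github.com/sikroz/ipprefix | ipprefix.py | find_common_bits_count
-- ===== SOURCE A (Python) =====
-- from typing import List
--
-- def find_common_bits_count(bytes_to_compare: List[int]):
--     common_bits = 0
--     while common_bits < 8:
--         mask = 1 << (7-common_bits)
--         prefix = bytes_to_compare[0] & mask
--         for b in bytes_to_compare[1:]:
--             if prefix != (b & mask):
--                 return common_bits
--         common_bits += 1
--     return common_bits
-- ===== SOURCE B (Python) =====
-- def find_common_bits_count(bytes_to_compare):
--     first = bytes_to_compare[0]
--     diff = 0
--     for b in bytes_to_compare[1:]: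
--         diff |= first ^ b
--     diff &= 0xFF
--     count = 0
--     while count < 8 and not ((diff >> (7 - count)) & 1):
--         count += 1
--     return count
-- ===== Notes on version B (the rewrite author's own statement) =====
-- stated objective: alternative
-- what changed: B makes a single pass OR-accumulating first^b into a difference mask, masks it to the low byte, and then counts leading zero bits of that byte, instead of A's separate whole-list scan per bit position.
import Mathlib
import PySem

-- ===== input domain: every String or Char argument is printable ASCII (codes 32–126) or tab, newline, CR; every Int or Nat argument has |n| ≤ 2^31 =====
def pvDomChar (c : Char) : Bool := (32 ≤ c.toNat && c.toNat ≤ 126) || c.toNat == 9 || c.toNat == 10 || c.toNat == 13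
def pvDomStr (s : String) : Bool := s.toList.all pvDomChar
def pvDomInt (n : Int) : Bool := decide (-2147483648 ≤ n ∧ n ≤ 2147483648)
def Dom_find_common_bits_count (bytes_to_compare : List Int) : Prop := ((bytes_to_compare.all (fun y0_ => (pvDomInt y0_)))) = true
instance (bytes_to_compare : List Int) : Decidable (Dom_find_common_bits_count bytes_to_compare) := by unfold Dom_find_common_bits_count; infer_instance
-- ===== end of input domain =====

-- B replaces A's up-to-8 whole-list passes by one OR-accumulating XOR pass plus an 8-step
-- leading-zero scan of the difference byte (objective: alternative decomposition).

-- ===== PORT A =====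
-- the inner `for b in bytes_to_compare[1:]` loop: false = the early `return common_bits` fired
def aAll (pfx mask : Int) : List Int → Bool
  | [] => true
  | b :: rest => if pfx ≠ PySem.Int.band b mask then false else aAll pfx mask rest

-- the `while common_bits < 8` loop; mask = 1 << (7 - common_bits), prefix = first & mask
def aWhile (first : Int) (rest : List Int) (common_bits : Nat) : Int :=
  if _h : common_bits < 8 then
    if aAll (PySem.Int.band first (((1 <<< (7 - common_bits) : Nat)) : Int))
            (((1 <<< (7 - common_bits) : Nat)) : Int) rest
    then aWhile first rest (common_bits + 1)
    else (common_bits : Int)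
  else (common_bits : Int)
termination_by 8 - common_bits

def find_common_bits_count (bytes_to_compare : List Int) : Int :=
  match bytes_to_compare with
  | [] => 0  -- unreachable: Python raises IndexError on [] (bytes_to_compare[0]); excluded by Pre_
  | first :: rest => aWhile first rest 0

-- ===== PORT B =====
-- the `while count < 8 and not ((diff >> (7 - count)) & 1)` loop of Source B
def bClz (diff : Int) (count : Nat) : Int :=
  if _h : count < 8 then
    if PySem.Int.band (diff >>> (((7 - count : Nat)) : Int)) 1 = 0
    then bClz diff (count + 1)
    else (count : Int)
  else (count : Int)
termination_by 8 - count

-- diff-accumulating pass (`diff |= first ^ b`), then `diff &= 0xFF`, then the scan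
def find_common_bits_count_alt (bytes_to_compare : List Int) : Int :=
  match bytes_to_compare with
  | [] => 0  -- unreachable: Source B raises IndexError on [] (bytes_to_compare[0]); excluded by Pre_
  | first :: rest =>
      bClz (PySem.Int.band (rest.foldl (fun d b => PySem.Int.bor d (PySem.Int.bxor first b)) 0) 255) 0

-- ===== PRECONDITION & SPEC =====
-- Pre_ excludes only the empty list, on which both A and B raise IndexError at bytes_to_compare[0].
def Pre_find_common_bits_count (bytes_to_compare : List Int) : Prop := bytes_to_compare ≠ []
instance (bytes_to_compare : List Int) : Decidable (Pre_find_common_bits_count bytes_to_compare) := by unfold Pre_find_common_bits_count; infer_instance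
def pvWitness_find_common_bits_count : List Int := [170, 160]

def Spec_find_common_bits_count (bytes_to_compare : List Int) (out : Int) : Prop := out = find_common_bits_count_alt bytes_to_compare
instance (bytes_to_compare : List Int) (out : Int) : Decidable (Spec_find_common_bits_count bytes_to_compare out) := by unfold Spec_find_common_bits_count; infer_instance

-- ===== CLAIM (what is proved, stated in full; the proofs are below) =====
def Claim_equal_find_common_bits_count : Prop := ∀ (bytes_to_compare : List Int), Dom_find_common_bits_count bytes_to_compare → Pre_find_common_bits_count bytes_to_compare → Spec_find_common_bits_count bytes_to_compare (find_common_bits_count bytes_to_compare)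

-- ===== LEMMAS AND PROOFS =====

theorem pvNegCast (k : Nat) : -(k : Int) - 1 = Int.negSucc k := by
  rw [Int.negSucc_eq]; ring

theorem pvTbNat (n i : Nat) : Int.testBit ((n : Nat) : Int) i = n.testBit i := rfl

theorem pvTbOfNat (n i : Nat) : (Int.ofNat n).testBit i = n.testBit i := rfl

theorem pvTbNegSucc (n i : Nat) : Int.testBit (Int.negSucc n) i = !n.testBit i := rfl

theorem pvToNatOfNat (n : Nat) : (Int.ofNat n).toNat = n := rfl

theorem pvAndAddLdiff (n m : Nat) : (n &&& m) + n.ldiff m = n := by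
  induction n using Nat.binaryRec generalizing m with
  | zero => simp [Nat.ldiff]
  | bit b n IH =>
    induction m using Nat.bitCasesOn with
    | bit c m =>
      rw [Nat.land_bit, Nat.ldiff_bit, Nat.bit_val, Nat.bit_val, Nat.bit_val]
      have h := IH m
      cases b <;> cases c <;>
        simp only [Bool.and_true, Bool.and_false, Bool.not_true, Bool.not_false,
          Bool.toNat_true, Bool.toNat_false] <;> omega

theorem pvSubAnd (n m : Nat) : n - (n &&& m) = n.ldiff m := by
  have := pvAndAddLdiff n m; omega

theorem pvTbBandNat (x : Int) (m i : Nat) :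
    (PySem.Int.band x ((m : Nat) : Int)).testBit i = (x.testBit i && m.testBit i) := by
  cases x with
  | ofNat n =>
    have h1 : (0 : Int) ≤ Int.ofNat n := Int.natCast_nonneg n
    have h2 : (0 : Int) ≤ ((m : Nat) : Int) := Int.natCast_nonneg m
    simp only [PySem.Int.band, if_pos h1, if_pos h2, Int.toNat_natCast, pvToNatOfNat]
    rw [pvTbNat, Nat.testBit_land, pvTbOfNat]
  | negSucc n =>
    have h1 : ¬ (0 : Int) ≤ Int.negSucc n := fun h => (Int.negSucc_not_nonneg n).mp h
    have h2 : (0 : Int) ≤ ((m : Nat) : Int) := Int.natCast_nonneg m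
    have h3 : -(Int.negSucc n) - 1 = ((n : Nat) : Int) := by rw [Int.negSucc_eq]; ring
    simp only [PySem.Int.band, if_neg h1, if_pos h2, h3, Int.toNat_natCast]
    rw [pvTbNat, pvSubAnd, Nat.testBit_ldiff, pvTbNegSucc, Bool.and_comm]

theorem pvTbBxor (a b : Int) (i : Nat) :
    (PySem.Int.bxor a b).testBit i = ((a.testBit i) ^^ (b.testBit i)) := by
  cases a with
  | ofNat n =>
    cases b with
    | ofNat m =>
      have h1 : (0 : Int) ≤ Int.ofNat n := Int.natCast_nonneg n
      have h2 : (0 : Int) ≤ Int.ofNat m := Int.natCast_nonneg m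
      simp only [PySem.Int.bxor, if_pos h1, if_pos h2, pvToNatOfNat]
      rw [pvTbNat, Nat.testBit_xor, pvTbOfNat, pvTbOfNat]
    | negSucc m =>
      have h1 : (0 : Int) ≤ Int.ofNat n := Int.natCast_nonneg n
      have h2 : ¬ (0 : Int) ≤ Int.negSucc m := fun h => (Int.negSucc_not_nonneg m).mp h
      have h3 : -(Int.negSucc m) - 1 = ((m : Nat) : Int) := by rw [Int.negSucc_eq]; ring
      simp only [PySem.Int.bxor, if_pos h1, if_neg h2, h3, Int.toNat_natCast, pvToNatOfNat]
      rw [pvNegCast, pvTbNegSucc, Nat.testBit_xor, pvTbOfNat, pvTbNegSucc]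
      cases n.testBit i <;> cases m.testBit i <;> rfl
  | negSucc n =>
    cases b with
    | ofNat m =>
      have h1 : ¬ (0 : Int) ≤ Int.negSucc n := fun h => (Int.negSucc_not_nonneg n).mp h
      have h2 : (0 : Int) ≤ Int.ofNat m := Int.natCast_nonneg m
      have h3 : -(Int.negSucc n) - 1 = ((n : Nat) : Int) := by rw [Int.negSucc_eq]; ring
      simp only [PySem.Int.bxor, if_neg h1, if_pos h2, h3, Int.toNat_natCast, pvToNatOfNat]
      rw [pvNegCast, pvTbNegSucc, Nat.testBit_xor, pvTbOfNat, pvTbNegSucc]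
      cases n.testBit i <;> cases m.testBit i <;> rfl
    | negSucc m =>
      have h1 : ¬ (0 : Int) ≤ Int.negSucc n := fun h => (Int.negSucc_not_nonneg n).mp h
      have h2 : ¬ (0 : Int) ≤ Int.negSucc m := fun h => (Int.negSucc_not_nonneg m).mp h
      have h3 : -(Int.negSucc n) - 1 = ((n : Nat) : Int) := by rw [Int.negSucc_eq]; ring
      have h4 : -(Int.negSucc m) - 1 = ((m : Nat) : Int) := by rw [Int.negSucc_eq]; ring
      simp only [PySem.Int.bxor, if_neg h1, if_neg h2, h3, h4, Int.toNat_natCast]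
      rw [pvTbNat, Nat.testBit_xor, pvTbNegSucc, pvTbNegSucc]
      cases n.testBit i <;> cases m.testBit i <;> rfl

theorem pvTbBor (a b : Int) (i : Nat) :
    (PySem.Int.bor a b).testBit i = ((a.testBit i) || (b.testBit i)) := by
  cases a with
  | ofNat n =>
    cases b with
    | ofNat m =>
      have h1 : (0 : Int) ≤ Int.ofNat n := Int.natCast_nonneg n
      have h2 : (0 : Int) ≤ Int.ofNat m := Int.natCast_nonneg m
      simp only [PySem.Int.bor, if_pos h1, if_pos h2, pvToNatOfNat]
      rw [pvTbNat, Nat.testBit_lor, pvTbOfNat, pvTbOfNat]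
    | negSucc m =>
      have h1 : (0 : Int) ≤ Int.ofNat n := Int.natCast_nonneg n
      have h2 : ¬ (0 : Int) ≤ Int.negSucc m := fun h => (Int.negSucc_not_nonneg m).mp h
      have h3 : -(Int.negSucc m) - 1 = ((m : Nat) : Int) := by rw [Int.negSucc_eq]; ring
      simp only [PySem.Int.bor, if_pos h1, if_neg h2, h3, Int.toNat_natCast, pvToNatOfNat]
      rw [pvNegCast, pvTbNegSucc, pvSubAnd, Nat.testBit_ldiff, pvTbOfNat, pvTbNegSucc]
      cases n.testBit i <;> cases m.testBit i <;> rfl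
  | negSucc n =>
    cases b with
    | ofNat m =>
      have h1 : ¬ (0 : Int) ≤ Int.negSucc n := fun h => (Int.negSucc_not_nonneg n).mp h
      have h2 : (0 : Int) ≤ Int.ofNat m := Int.natCast_nonneg m
      have h3 : -(Int.negSucc n) - 1 = ((n : Nat) : Int) := by rw [Int.negSucc_eq]; ring
      simp only [PySem.Int.bor, if_neg h1, if_pos h2, h3, Int.toNat_natCast, pvToNatOfNat]
      rw [pvNegCast, pvTbNegSucc, pvSubAnd, Nat.testBit_ldiff, pvTbOfNat, pvTbNegSucc]
      cases n.testBit i <;> cases m.testBit i <;> rfl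
    | negSucc m =>
      have h1 : ¬ (0 : Int) ≤ Int.negSucc n := fun h => (Int.negSucc_not_nonneg n).mp h
      have h2 : ¬ (0 : Int) ≤ Int.negSucc m := fun h => (Int.negSucc_not_nonneg m).mp h
      have h3 : -(Int.negSucc n) - 1 = ((n : Nat) : Int) := by rw [Int.negSucc_eq]; ring
      have h4 : -(Int.negSucc m) - 1 = ((m : Nat) : Int) := by rw [Int.negSucc_eq]; ring
      simp only [PySem.Int.bor, if_neg h1, if_neg h2, h3, h4, Int.toNat_natCast]
      rw [pvNegCast, pvTbNegSucc, Nat.testBit_land, pvTbNegSucc, pvTbNegSucc]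
      cases n.testBit i <;> cases m.testBit i <;> rfl

theorem pvBandTwoPow (x : Int) (i : Nat) :
    PySem.Int.band x (((2 ^ i : Nat)) : Int) =
      if x.testBit i then (((2 ^ i : Nat)) : Int) else 0 := by
  cases x with
  | ofNat n =>
    have h1 : (0 : Int) ≤ Int.ofNat n := Int.natCast_nonneg n
    have h2 : (0 : Int) ≤ ((2 ^ i : Nat) : Int) := Int.natCast_nonneg _
    simp only [PySem.Int.band, if_pos h1, if_pos h2, Int.toNat_natCast, pvToNatOfNat]
    rw [Nat.and_two_pow, pvTbOfNat]
    cases n.testBit i <;> simp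
  | negSucc n =>
    have h1 : ¬ (0 : Int) ≤ Int.negSucc n := fun h => (Int.negSucc_not_nonneg n).mp h
    have h2 : (0 : Int) ≤ ((2 ^ i : Nat) : Int) := Int.natCast_nonneg _
    have h3 : -(Int.negSucc n) - 1 = ((n : Nat) : Int) := by rw [Int.negSucc_eq]; ring
    simp only [PySem.Int.band, if_neg h1, if_pos h2, h3, Int.toNat_natCast]
    rw [Nat.two_pow_and, pvTbNegSucc]
    cases n.testBit i <;> simp

theorem pvIfEq (m : Int) (hm : m ≠ 0) (p q : Bool) :
    ((if p then m else 0) = if q then m else 0) ↔ p = q := by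
  cases p <;> cases q <;> simp [hm, Ne.symm hm]

theorem pvBandEqIff (x y : Int) (i : Nat) :
    (PySem.Int.band x (((2 ^ i : Nat)) : Int) = PySem.Int.band y (((2 ^ i : Nat)) : Int)) ↔
      x.testBit i = y.testBit i := by
  have hne : (((2 ^ i : Nat)) : Int) ≠ 0 := by positivity
  rw [pvBandTwoPow, pvBandTwoPow, pvIfEq _ hne]

theorem pvTbShift (x : Int) (i : Nat) :
    (x >>> (((i : Nat)) : Int)).testBit 0 = x.testBit i := by
  cases x with
  | ofNat n =>
    show (((n : Nat) : Int) >>> ((i : Nat) : Int)).testBit 0 = _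
    rw [Int.shiftRight_natCast, pvTbNat, Nat.testBit_shiftRight]
    rfl
  | negSucc n =>
    rw [Int.shiftRight_negSucc, pvTbNegSucc, pvTbNegSucc, Nat.testBit_shiftRight]
    rfl

theorem pvBitTest (x : Int) (i : Nat) :
    (PySem.Int.band (x >>> (((i : Nat)) : Int)) 1 = 0) ↔ x.testBit i = false := by
  have h1 : (1 : Int) = (((2 ^ 0 : Nat)) : Int) := by norm_num
  rw [h1, pvBandTwoPow, pvTbShift]
  cases x.testBit i <;> simp

theorem pvFoldTb (first : Int) (rest : List Int) (d : Int) (i : Nat) :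
    (rest.foldl (fun d b => PySem.Int.bor d (PySem.Int.bxor first b)) d).testBit i
      = (d.testBit i || rest.any (fun b => (first.testBit i) ^^ (b.testBit i))) := by
  induction rest generalizing d with
  | nil => simp
  | cons b rest IH =>
    simp only [List.foldl_cons, List.any_cons, IH, pvTbBor, pvTbBxor, Bool.or_assoc]

theorem pvAllIff (pfx mask : Int) (rest : List Int) :
    aAll pfx mask rest = true ↔ ∀ b ∈ rest, pfx = PySem.Int.band b mask := by
  induction rest with
  | nil => simp [aAll]
  | cons b rest IH =>
    rw [aAll]
    by_cases h : pfx = PySem.Int.band b mask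
    · rw [if_neg (not_not_intro h), IH]
      simp only [List.forall_mem_cons]
      exact (and_iff_right h).symm
    · rw [if_pos h]
      simp only [Bool.false_eq_true, false_iff, List.forall_mem_cons, not_and]
      intro hb; exact absurd hb h

theorem pvMask255 (x : Int) (i : Nat) (hi : i < 8) :
    (PySem.Int.band x 255).testBit i = x.testBit i := by
  have h255 : (255 : Int) = (((255 : Nat)) : Int) := rfl
  rw [h255, pvTbBandNat]
  have h : (255 : Nat) = 2 ^ 8 - 1 := by norm_num
  rw [h, Nat.testBit_two_pow_sub_one]
  simp [hi]

theorem pvGuards (first : Int) (rest : List Int) (k : Nat) (_hk : k < 8) :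
    (aAll (PySem.Int.band first (((1 <<< (7 - k) : Nat)) : Int))
          (((1 <<< (7 - k) : Nat)) : Int) rest = true) ↔
    (PySem.Int.band
        ((PySem.Int.band (rest.foldl (fun d b => PySem.Int.bor d (PySem.Int.bxor first b)) 0) 255)
          >>> (((7 - k : Nat)) : Int)) 1 = 0) := by
  have hm : (1 <<< (7 - k) : Nat) = 2 ^ (7 - k) := by rw [Nat.shiftLeft_eq, one_mul]
  have hlt : 7 - k < 8 := by omega
  rw [hm, pvAllIff, pvBitTest, pvMask255 _ _ hlt, pvFoldTb]
  have h0 : Int.testBit 0 (7 - k) = false := by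
    show Nat.testBit 0 (7 - k) = false
    simp
  rw [h0, Bool.false_or, List.any_eq_false]
  constructor
  · intro h b hb
    have hbits := (pvBandEqIff first b (7 - k)).mp (h b hb)
    rw [hbits]
    simp
  · intro h b hb
    refine (pvBandEqIff first b (7 - k)).mpr ?_
    have hbx := h b hb
    cases hf : first.testBit (7 - k) <;> cases hbb : b.testBit (7 - k) <;>
      simp [hf, hbb] at hbx ⊢

theorem pvLoop (first : Int) (rest : List Int) :
    ∀ (n k : Nat), 8 - k = n →
      aWhile first rest k =
        bClz (PySem.Int.band (rest.foldl (fun d b => PySem.Int.bor d (PySem.Int.bxor first b)) 0) 255) k := by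
  intro n
  induction n with
  | zero =>
    intro k hk
    have h8 : ¬ k < 8 := by omega
    rw [aWhile, bClz, dif_neg h8, dif_neg h8]
  | succ n IH =>
    intro k hk
    have h8 : k < 8 := by omega
    rw [aWhile, bClz, dif_pos h8, dif_pos h8]
    by_cases hc : aAll (PySem.Int.band first (((1 <<< (7 - k) : Nat)) : Int))
        (((1 <<< (7 - k) : Nat)) : Int) rest = true
    · have hc2 := (pvGuards first rest k h8).mp hc
      rw [if_pos hc, if_pos hc2]
      exact IH (k + 1) (by omega)
    · have hc2 : ¬ (PySem.Int.band
          ((PySem.Int.band (rest.foldl (fun d b => PySem.Int.bor d (PySem.Int.bxor first b)) 0) 255)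
            >>> (((7 - k : Nat)) : Int)) 1 = 0) :=
        fun h => hc ((pvGuards first rest k h8).mpr h)
      rw [if_neg hc, if_neg hc2]

-- ===== VERDICT (by name: the statement is the Claim_ definition above) =====
theorem find_common_bits_count_spec : Claim_equal_find_common_bits_count := by
  intro bytes_to_compare _dom hpre
  unfold Spec_find_common_bits_count
  cases bytes_to_compare with
  | nil => exact absurd rfl hpre
  | cons first rest =>
    show aWhile first rest 0 = _
    exact pvLoop first rest 8 0 rfl
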